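-- pv_equiv track=rewrite | github.com/Cigilipuf/whitehathackerai | src/tools/scanners/custom_checks/cloud_checker.py | _filter_endpoints_by_tech
-- ===== SOURCE A (Python) =====
-- _TECH_CATEGORY_FILTER: dict[str, list[str]] = {
--     "kubernetes": ["kubernetes", "k8s", "kubectl", "helm", "kube"],
--     "cicd": ["jenkins", "gitlab", "github", "gitea", "forgejo", "ci/cd", "cicd"],
--     "container": ["docker", "containerd", "podman", "portainer", "registry"],
--     "serverless": ["lambda", "serverless", "netlify", "vercel", "cloud function",
--                    "azure function", "firebase"],
-- }
--
-- def _filter_endpoints_by_tech(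
--     endpoints: list[tuple[str, str, str, str]],
--     technologies: list[str] | None,
-- ) -> list[tuple[str, str, str, str]]:
--     """Filter cloud endpoints based on detected technologies.
--
--     Categories listed in _TECH_CATEGORY_FILTER are only probed when at
--     least one matching tech keyword is detected.  Categories NOT in the
--     filter dict (config, monitoring, secrets, cloud_meta) are always probed.
--     """
--     if not technologies:
--         return endpoints  # No tech info — probe everything
--
--     tech_lower = {t.lower() for t in technologies}
--
--     def _cat_allowed(category: str) -> bool:
--         required = _TECH_CATEGORY_FILTER.get(category)
--         if required is None:
--             return True  # Universal category
--         return any(kw in tech_text for kw in required for tech_text in tech_lower)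
--
--     return [ep for ep in endpoints if _cat_allowed(ep[3])]
-- ===== SOURCE B (Python) =====
-- _TECH_CATEGORY_FILTER: dict[str, list[str]] = {
--     "kubernetes": ["kubernetes", "k8s", "kubectl", "helm", "kube"],
--     "cicd": ["jenkins", "gitlab", "github", "gitea", "forgejo", "ci/cd", "cicd"],
--     "container": ["docker", "containerd", "podman", "portainer", "registry"],
--     "serverless": ["lambda", "serverless", "netlify", "vercel", "cloud function",
--                    "azure function", "firebase"],
-- }
--
-- def _filter_endpoints_by_tech(endpoints, technologies):
--     if not technologies:
--         return endpoints
--     # One pass over the detected tech strings, marking every category whose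
--     # keyword list is hit; endpoints then need only two O(1) membership tests.
--     allowed = set()
--     for t in technologies:
--         tech_text = t.lower()
--         for category, required in _TECH_CATEGORY_FILTER.items():
--             if any(kw in tech_text for kw in required):
--                 allowed.add(category)
--     out = []
--     for ep in endpoints:
--         if ep[3] not in _TECH_CATEGORY_FILTER or ep[3] in allowed:
--             out.append(ep)
--     return out
-- ===== Notes on version B (the rewrite author's own statement) =====
-- stated objective: alternative
-- what changed: B inverts the loop structure: instead of re-running the nested any(...) keyword scan per endpoint, it makes one pass over the tech strings building the set of hit (allowed) categories, and the endpoint pass is an explicit accumulator loop doing two O(1) membership tests (category not in filter dict, or in the allowed set).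
import Mathlib
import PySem

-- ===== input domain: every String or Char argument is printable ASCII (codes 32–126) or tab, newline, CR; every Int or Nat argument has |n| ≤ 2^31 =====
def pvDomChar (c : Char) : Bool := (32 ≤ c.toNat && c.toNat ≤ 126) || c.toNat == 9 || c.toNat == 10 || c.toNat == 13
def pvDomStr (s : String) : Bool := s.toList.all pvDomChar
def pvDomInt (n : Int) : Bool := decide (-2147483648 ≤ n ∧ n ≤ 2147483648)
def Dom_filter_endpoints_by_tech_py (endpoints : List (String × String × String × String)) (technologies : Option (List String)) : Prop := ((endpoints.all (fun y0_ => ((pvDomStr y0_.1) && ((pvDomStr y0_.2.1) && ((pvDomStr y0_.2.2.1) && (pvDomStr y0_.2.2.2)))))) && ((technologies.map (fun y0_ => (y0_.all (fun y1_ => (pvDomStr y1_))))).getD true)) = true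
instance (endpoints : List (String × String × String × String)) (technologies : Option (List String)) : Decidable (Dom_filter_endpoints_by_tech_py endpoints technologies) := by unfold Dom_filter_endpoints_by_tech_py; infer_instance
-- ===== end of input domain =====

-- B makes one pass over the tech strings building the set of allowed categories, then filters endpoints with an accumulator loop of two membership tests (alternative decomposition, same result).


-- module-level constant _TECH_CATEGORY_FILTER, shared by both Pythons
def pvTechFilter : PySem.Dict String (List String) := PySem.Dict.ofList
  [("kubernetes", ["kubernetes", "k8s", "kubectl", "helm", "kube"]),
   ("cicd", ["jenkins", "gitlab", "github", "gitea", "forgejo", "ci/cd", "cicd"]),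
   ("container", ["docker", "containerd", "podman", "portainer", "registry"]),
   ("serverless", ["lambda", "serverless", "netlify", "vercel", "cloud function",
                   "azure function", "firebase"])]

-- ===== PORT A =====
def filter_endpoints_by_tech_py (endpoints : List (String × String × String × String)) (technologies : Option (List String)) : List (String × String × String × String) :=
  match technologies with
  | none => endpoints
  | some ts =>
    if ts.isEmpty then endpoints
    else
      let techLower : PySem.Set String := PySem.Set.ofList (ts.map PySem.Str.lower)
      let catAllowed : String → Bool := fun category =>
        match pvTechFilter.get? category with
        | none => true
        | some required => required.any (fun kw => techLower.any (fun techText => PySem.Str.isIn kw techText))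
      endpoints.filter (fun ep => catAllowed ep.2.2.2)

-- ===== PORT B =====
-- the 'for t in technologies: for category, required in items: if any(kw in tech_text): allowed.add(category)' pass
def pvAllowedOf (ts : List String) : PySem.Set String :=
  ts.foldl
    (fun allowed t =>
      let techText := PySem.Str.lower t
      pvTechFilter.items.foldl
        (fun acc p =>
          if p.2.any (fun kw => PySem.Str.isIn kw techText) then PySem.Set.add acc p.1 else acc)
        allowed)
    PySem.Set.empty

-- the 'for ep in endpoints: if ep[3] not in _TECH_CATEGORY_FILTER or ep[3] in allowed: out.append(ep)' pass
def pvKeepEndpoints (allowed : PySem.Set String) : List (String × String × String × String) → List (String × String × String × String)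
  | [] => []
  | ep :: rest =>
    if !(pvTechFilter.contains ep.2.2.2) || PySem.Set.contains allowed ep.2.2.2
    then ep :: pvKeepEndpoints allowed rest
    else pvKeepEndpoints allowed rest

def filter_endpoints_by_tech_py_alt (endpoints : List (String × String × String × String)) (technologies : Option (List String)) : List (String × String × String × String) :=
  match technologies with
  | none => endpoints
  | some ts =>
    if ts.isEmpty then endpoints
    else pvKeepEndpoints (pvAllowedOf ts) endpoints

-- ===== PRECONDITION & SPEC =====
def Spec_filter_endpoints_by_tech_py (endpoints : List (String × String × String × String)) (technologies : Option (List String)) (out : List (String × String × String × String)) : Prop := out = filter_endpoints_by_tech_py_alt endpoints technologies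
instance (endpoints : List (String × String × String × String)) (technologies : Option (List String)) (out : List (String × String × String × String)) : Decidable (Spec_filter_endpoints_by_tech_py endpoints technologies out) := by unfold Spec_filter_endpoints_by_tech_py; infer_instance

-- ===== CLAIM =====
def Claim_equal_filter_endpoints_by_tech_py : Prop := ∀ (endpoints : List (String × String × String × String)) (technologies : Option (List String)), Dom_filter_endpoints_by_tech_py endpoints technologies → Spec_filter_endpoints_by_tech_py endpoints technologies (filter_endpoints_by_tech_py endpoints technologies)

-- ===== LEMMAS AND PROOFS =====

-- the per-(tech string) hit test B's inner loop realises, as a function of the category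
def pvCatHit (s : String) (u : String) : Bool :=
  match pvTechFilter.get? s with
  | none => false
  | some required => required.any (fun kw => PySem.Str.isIn kw u)

set_option maxRecDepth 8000 in
set_option maxHeartbeats 1600000 in
-- one inner pass over the four filter items adds exactly the categories hit by f
theorem pv_inner_fold (f : List String → Bool) (acc : PySem.Set String) (s : String) :
    PySem.Set.contains
      (pvTechFilter.items.foldl
        (fun acc p => if f p.2 then PySem.Set.add acc p.1 else acc) acc) s
    = (PySem.Set.contains acc s ||
       (match pvTechFilter.get? s with
        | none => false
        | some required => f required)) := by
  have hitems : pvTechFilter.items =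
      [("kubernetes", ["kubernetes", "k8s", "kubectl", "helm", "kube"]),
       ("cicd", ["jenkins", "gitlab", "github", "gitea", "forgejo", "ci/cd", "cicd"]),
       ("container", ["docker", "containerd", "podman", "portainer", "registry"]),
       ("serverless", ["lambda", "serverless", "netlify", "vercel", "cloud function",
                       "azure function", "firebase"])] := rfl
  have hget : pvTechFilter.get? s =
      (if "kubernetes" == s then some ["kubernetes", "k8s", "kubectl", "helm", "kube"]
       else if "cicd" == s then some ["jenkins", "gitlab", "github", "gitea", "forgejo", "ci/cd", "cicd"]
       else if "container" == s then some ["docker", "containerd", "podman", "portainer", "registry"]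
       else if "serverless" == s then some ["lambda", "serverless", "netlify", "vercel", "cloud function",
                                            "azure function", "firebase"]
       else none) := by
    simp only [show pvTechFilter = PySem.Dict.mk
        [("kubernetes", ["kubernetes", "k8s", "kubectl", "helm", "kube"]),
         ("cicd", ["jenkins", "gitlab", "github", "gitea", "forgejo", "ci/cd", "cicd"]),
         ("container", ["docker", "containerd", "podman", "portainer", "registry"]),
         ("serverless", ["lambda", "serverless", "netlify", "vercel", "cloud function",
                         "azure function", "firebase"])] from rfl,
      PySem.Dict.get?_mk_cons]
    simp [PySem.Dict.get?]
  rw [hitems, hget]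
  simp only [List.foldl]
  cases h1 : f ["kubernetes", "k8s", "kubectl", "helm", "kube"] <;>
  cases h2 : f ["jenkins", "gitlab", "github", "gitea", "forgejo", "ci/cd", "cicd"] <;>
  cases h3 : f ["docker", "containerd", "podman", "portainer", "registry"] <;>
  cases h4 : f ["lambda", "serverless", "netlify", "vercel", "cloud function", "azure function", "firebase"] <;>
  by_cases e1 : s = "kubernetes" <;> by_cases e2 : s = "cicd" <;>
  by_cases e3 : s = "container" <;> by_cases e4 : s = "serverless" <;>
  simp [h1, h2, h3, h4, e1, e2, e3, e4, eq_comm (b := s)]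

-- the outer pass over tech strings: a category ends up in 'allowed' iff some tech string hits it
theorem pv_allowed_fold (ts : List String) (acc : PySem.Set String) (s : String) :
    PySem.Set.contains
      (ts.foldl
        (fun allowed t =>
          let techText := PySem.Str.lower t
          pvTechFilter.items.foldl
            (fun acc p =>
              if p.2.any (fun kw => PySem.Str.isIn kw techText) then PySem.Set.add acc p.1 else acc)
            allowed)
        acc) s
    = (PySem.Set.contains acc s || ts.any (fun t => pvCatHit s (PySem.Str.lower t))) := by
  induction ts generalizing acc with
  | nil => simp
  | cons t ts ih =>
    simp only [List.foldl, List.any_cons]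
    rw [ih, pv_inner_fold (fun required => required.any (fun kw => PySem.Str.isIn kw (PySem.Str.lower t)))]
    cases h : pvTechFilter.get? s <;> simp [pvCatHit, h, Bool.or_assoc]

theorem pv_contains_allowedOf (ts : List String) (s : String) :
    PySem.Set.contains (pvAllowedOf ts) s = ts.any (fun t => pvCatHit s (PySem.Str.lower t)) := by
  unfold pvAllowedOf
  rw [pv_allowed_fold]
  simp [PySem.Set.empty, PySem.Set.contains]

-- B's per-endpoint test equals A's catAllowed test
theorem pv_pred_eq (ts : List String) (s : String) :
    (!(pvTechFilter.contains s) || PySem.Set.contains (pvAllowedOf ts) s)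
    = (match pvTechFilter.get? s with
       | none => true
       | some required => required.any (fun kw =>
           (PySem.Set.ofList (ts.map PySem.Str.lower)).any (fun techText => PySem.Str.isIn kw techText))) := by
  rw [pv_contains_allowedOf, PySem.Dict.contains_eq_isSome_get?]
  cases h : pvTechFilter.get? s with
  | none => simp [pvCatHit, h]
  | some required =>
    simp only [Option.isSome_some, Bool.not_true, Bool.false_or]
    rw [Bool.eq_iff_iff]
    simp only [List.any_eq_true, pvCatHit, h, PySem.Set.mem_ofList, List.mem_map]
    constructor
    · rintro ⟨t, ht, kw, hkw, hin⟩
      exact ⟨kw, hkw, PySem.Str.lower t, ⟨t, ht, rfl⟩, hin⟩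
    · rintro ⟨kw, hkw, u, ⟨t, ht, rfl⟩, hin⟩
      exact ⟨t, ht, kw, hkw, hin⟩

-- B's accumulator loop is a filter by its test
theorem pv_keep_eq_filter (allowed : PySem.Set String) (eps : List (String × String × String × String)) :
    pvKeepEndpoints allowed eps
    = eps.filter (fun ep => !(pvTechFilter.contains ep.2.2.2) || PySem.Set.contains allowed ep.2.2.2) := by
  induction eps with
  | nil => rfl
  | cons ep rest ih =>
    simp only [pvKeepEndpoints, List.filter_cons, ih]

-- ===== VERDICT =====
theorem filter_endpoints_by_tech_py_spec : Claim_equal_filter_endpoints_by_tech_py := by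
  intro endpoints technologies _
  unfold Spec_filter_endpoints_by_tech_py filter_endpoints_by_tech_py filter_endpoints_by_tech_py_alt
  cases technologies with
  | none => rfl
  | some ts =>
    cases hts : ts.isEmpty with
    | true => simp [hts]
    | false =>
      simp only [hts, Bool.false_eq_true, if_false]
      rw [pv_keep_eq_filter]
      exact (List.filter_congr (fun ep _ => (pv_pred_eq ts ep.2.2.2))).symm
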